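-- pv_equiv track=rewrite | github.com/vladumbrava/lab-assignment-2.finale | functions.py | sorted_higher
-- ===== SOURCE A (Python) =====
-- def sorted_higher(score_list, value):
--     new_list = []
--     for i,score in enumerate(score_list):
--         if score > value:
--             new_list.append((i, score))
--     sorted_list = sorted(new_list, key=lambda x: x[1])
--     output = [i for i, _ in sorted_list]
--     return output
-- ===== SOURCE B (Python) =====
-- def sorted_higher(score_list, value):
--     order = sorted(range(len(score_list)), key=lambda i: score_list[i])
--     return [i for i in order if score_list[i] > value]
-- ===== Notes on version B (the rewrite author's own statement) =====
-- stated objective: simpler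
-- what changed: B reverses A's two passes: instead of filtering (index, score) pairs and then sorting them, B stably sorts all indices by score first and filters the sorted index list afterward, so no tuple list is built at all.
import Mathlib
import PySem

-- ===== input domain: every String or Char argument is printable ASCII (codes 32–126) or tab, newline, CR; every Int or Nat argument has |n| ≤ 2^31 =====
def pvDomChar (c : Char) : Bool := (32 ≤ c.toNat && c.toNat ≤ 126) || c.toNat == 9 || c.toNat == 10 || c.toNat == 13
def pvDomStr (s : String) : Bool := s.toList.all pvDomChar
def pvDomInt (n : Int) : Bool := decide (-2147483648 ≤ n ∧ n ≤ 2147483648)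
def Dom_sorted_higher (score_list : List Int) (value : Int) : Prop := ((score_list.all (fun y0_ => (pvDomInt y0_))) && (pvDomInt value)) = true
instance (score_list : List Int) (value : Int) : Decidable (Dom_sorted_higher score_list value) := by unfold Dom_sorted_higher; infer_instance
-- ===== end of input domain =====

-- B sorts the whole index range by score first (stably) and filters afterward, instead of
-- A's filter-then-sort over (index, score) pairs; same output order, no tuple list (objective: simpler).


-- ===== PORT A =====
def sorted_higher (score_list : List Int) (value : Int) : List Int :=
  let new_list := (PySem.List.enumerate score_list 0).foldl
    (fun acc p => if p.2 > value then acc ++ [p] else acc) ([] : List (Int × Int))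
  let sorted_list := PySem.List.sorted new_list (fun x => x.2)
  sorted_list.map (fun p => p.1)

-- ===== PORT B =====
-- score_list[i] is ported with pyGetD: every i drawn from range(len(score_list)) is in range,
-- so it is exact here (Python never raises in B).
def sorted_higher_alt (score_list : List Int) (value : Int) : List Int :=
  let order := PySem.List.sorted (PySem.List.pyRange 0 (score_list.length : Int) 1)
    (fun i => PySem.List.pyGetD score_list i 0)
  order.filter (fun i => decide (PySem.List.pyGetD score_list i 0 > value))

-- ===== PRECONDITION & SPEC =====
def Spec_sorted_higher (score_list : List Int) (value : Int) (out : List Int) : Prop := out = sorted_higher_alt score_list value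
instance (score_list : List Int) (value : Int) (out : List Int) : Decidable (Spec_sorted_higher score_list value out) := by unfold Spec_sorted_higher; infer_instance

-- ===== CLAIM (what is proved, stated in full; the proofs are below) =====
def Claim_equal_sorted_higher : Prop := ∀ (score_list : List Int) (value : Int), Dom_sorted_higher score_list value → Spec_sorted_higher score_list value (sorted_higher score_list value)

-- ===== LEMMAS AND PROOFS =====

-- pyGetD steps over a cons for a positive index (used to relate enumerate to index lookups)
theorem pyGetD_cons_pos (xs : List Int) (x : Int) (i : Int) (h : 1 ≤ i) :
    PySem.List.pyGetD (x :: xs) i 0 = PySem.List.pyGetD xs (i-1) 0 := by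
  have h0 : (0:Int) ≤ i := by omega
  simp only [PySem.List.pyGetD, PySem.List.pyGet?, PySem.List.pyIdx?, List.length_cons]
  rw [if_pos (show (0:Int) ≤ i - 1 by omega)]
  by_cases hle : i ≤ (xs.length : Int)
  · rw [if_pos (show i < ((xs.length + 1 : Nat) : Int) by push_cast; omega)]
    obtain ⟨k, hk⟩ : ∃ k, i.toNat = k + 1 := ⟨i.toNat - 1, by omega⟩
    have hk2 : (i - 1).toNat = k := by omega
    simp [hk, hk2, hle, h0]
  · simp [hle, h0]

-- enumerate(xs, s) lists exactly the pairs (i, xs[i-s]) for i in range(s, s+len(xs))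
theorem enumerate_eq_map_range (xs : List Int) : ∀ (s : Int),
    PySem.List.enumerate xs s =
      (PySem.List.pyRange s (s + (xs.length : Int)) 1).map
        (fun i => (i, PySem.List.pyGetD xs (i - s) 0)) := by
  induction xs with
  | nil =>
    intro s
    rw [PySem.List.enumerate_nil, PySem.List.pyRange_one_eq_nil (by simp)]
    simp
  | cons x t ih =>
    intro s
    rw [PySem.List.enumerate_cons, ih (s+1),
      PySem.List.pyRange_one_cons (show s < s + ((x :: t).length : Int) by simp)]
    have hhead : PySem.List.pyGetD (x :: t) (s - s) 0 = x := by
      rw [sub_self]; simp [PySem.List.pyGetD, PySem.List.pyGet?, PySem.List.pyIdx?]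
    simp only [List.map_cons, List.length_cons, hhead]
    congr 1
    have harr : s + ((t.length + 1 : Nat) : Int) = s + 1 + (t.length : Int) := by push_cast; omega
    rw [harr]
    apply List.map_congr_left
    intro i hi
    have hb := PySem.List.mem_pyRange_one.mp hi
    have hstep : PySem.List.pyGetD (x :: t) (i - s) 0 = PySem.List.pyGetD t (i - s - 1) 0 :=
      pyGetD_cons_pos t x (i - s) (by omega)
    rw [show i - (s+1) = i - s - 1 by ring, ← hstep]

-- insertBy maps through List.map when the comparator factors through the map
theorem insertBy_map {α β : Type} (f : α → β) (before : β → β → Bool) (x : α) :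
    ∀ (ys : List α),
      PySem.List.insertBy before (f x) (ys.map f) =
        (PySem.List.insertBy (fun a b => before (f a) (f b)) x ys).map f := by
  intro ys
  induction ys with
  | nil => simp [PySem.List.insertBy]
  | cons y t ih =>
    simp only [List.map_cons, PySem.List.insertBy]
    by_cases h : before (f x) (f y) <;> simp [h, ih]

-- stable sort of a mapped list = map of the stable sort under the composed key
theorem sorted_map (f : Int → Int × Int) (key : Int × Int → Int) (ys : List Int) :
    PySem.List.sorted (ys.map f) key = (PySem.List.sorted ys (fun a => key (f a))).map f := by
  rw [PySem.List.sorted_eq_foldl_insertBy, PySem.List.sorted_eq_foldl_insertBy]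
  suffices h : ∀ (acc : List Int),
      (ys.map f).foldl (fun acc x => PySem.List.insertBy (fun a b => decide (key a < key b)) x acc) (acc.map f) =
      (ys.foldl (fun acc x => PySem.List.insertBy (fun a b => decide (key (f a) < key (f b))) x acc) acc).map f by
    simpa using h []
  induction ys with
  | nil => intro acc; simp
  | cons y t ih =>
    intro acc
    simp only [List.map_cons, List.foldl_cons]
    rw [insertBy_map f (fun a b => decide (key a < key b)) y acc]
    exact ih _

-- inserting into a key-sorted list commutes with filtering
theorem insertBy_filter (key : α → Int) (p : α → Bool) (x : α) :
    ∀ (ys : List α), ys.Pairwise (fun a b => key a ≤ key b) →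
      (PySem.List.insertBy (fun a b => decide (key a < key b)) x ys).filter p =
        (if p x then PySem.List.insertBy (fun a b => decide (key a < key b)) x (ys.filter p)
         else ys.filter p) := by
  intro ys
  induction ys with
  | nil => intro _; by_cases h : p x <;> simp [PySem.List.insertBy, h]
  | cons y t ih =>
    intro hp
    rw [List.pairwise_cons] at hp
    obtain ⟨hy, ht⟩ := hp
    simp only [PySem.List.insertBy]
    by_cases hxy : key x < key y
    · -- x goes in front; every element of (y :: t).filter p has key ≥ key y > key x
      have hfront : ∀ zs : List α, (∀ z ∈ zs, key x < key z) →
          PySem.List.insertBy (fun a b => decide (key a < key b)) x zs = x :: zs := by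
        intro zs hz
        cases zs with
        | nil => simp [PySem.List.insertBy]
        | cons z w => simp [PySem.List.insertBy, hz z (by simp)]
      by_cases hpx : p x
      · rw [if_pos (by simpa using hxy), if_pos hpx]
        rw [hfront ((y :: t).filter p) ?_]
        · simp [hpx]
        · intro z hz
          have hzmem := List.mem_of_mem_filter hz
          rcases List.mem_cons.mp hzmem with h | h
          · subst h; omega
          · have := hy z h; omega
      · rw [if_pos (by simpa using hxy), if_neg hpx]
        simp [hpx]
    · rw [if_neg (by simpa using hxy)]
      by_cases hpy : p y <;> by_cases hpx : p x <;>
        simp [hpy, hpx, ih ht, PySem.List.insertBy,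
          show ¬ (key x < key y) from hxy]

-- appending one element to the input of the stable sort is one insertion
theorem sorted_append_singleton (key : α → Int) (t : List α) (x : α) :
    PySem.List.sorted (t ++ [x]) key =
      PySem.List.insertBy (fun a b => decide (key a < key b)) x (PySem.List.sorted t key) := by
  rw [PySem.List.sorted_eq_foldl_insertBy, List.foldl_append, List.foldl_cons, List.foldl_nil,
    ← PySem.List.sorted_eq_foldl_insertBy]

-- stable sort commutes with filter
theorem sorted_filter (key : α → Int) (p : α → Bool) (ys : List α) :
    PySem.List.sorted (ys.filter p) key = (PySem.List.sorted ys key).filter p := by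
  induction ys using List.reverseRecOn with
  | nil => simp [PySem.List.sorted]
  | append_singleton t x ih =>
    rw [List.filter_append, sorted_append_singleton,
      insertBy_filter key p x (PySem.List.sorted t key) (PySem.List.sorted_pairwise t key)]
    by_cases hpx : p x
    · simp only [List.filter_cons, List.filter_nil, hpx, if_pos]
      rw [sorted_append_singleton, ih]
    · simp only [List.filter_cons, List.filter_nil, hpx, Bool.false_eq_true, if_false,
        List.append_nil]
      exact ih

-- ===== VERDICT (by name: the statement is the Claim_ definition above) =====
theorem sorted_higher_spec : Claim_equal_sorted_higher := by
  unfold Claim_equal_sorted_higher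
  intro xs v _
  unfold Spec_sorted_higher sorted_higher sorted_higher_alt
  simp only []
  have hfold : (fun (acc : List (Int × Int)) (p : Int × Int) => if p.2 > v then acc ++ [p] else acc)
      = (fun acc p => if (fun q : Int × Int => decide (q.2 > v)) p = true then acc ++ [id p] else acc) := by
    funext acc p; simp
  rw [hfold, PySem.List.foldl_append_if (fun q : Int × Int => decide (q.2 > v)) id]
  simp only [List.nil_append, List.map_id]
  rw [sorted_filter (fun x : Int × Int => x.2) (fun q : Int × Int => decide (q.2 > v)),
    enumerate_eq_map_range xs 0]
  simp only [zero_add, sub_zero]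
  rw [sorted_map (fun i => (i, PySem.List.pyGetD xs i 0)) (fun x => x.2)]
  rw [List.filter_map, List.map_map]
  simp [Function.comp_def]
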